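-- pv_equiv track=rewrite | github.com/saloaaro/TIRA1 | sumlen.py | count
-- ===== SOURCE A (Python) =====
-- def count(t):
--     n = len(t)
--     prefix_sum = [0] * (n + 1)
--     for i in range(n):
--         prefix_sum[i + 1] = prefix_sum[i] + t[i]
--
--     count = 0
--     sum_set = set()
--
--     for i in range(n):
--         for j in range(i, n):
--             curr_sum = prefix_sum[j + 1] - prefix_sum[i]
--             if curr_sum <= j - i + 1 and curr_sum >= 1 and curr_sum not in sum_set:
--                 count += 1
--                 sum_set.add(curr_sum)
--
--     return count
-- ===== SOURCE B (Python) =====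
-- def count(t):
--     # Scan by END index: maintain the list of running sums of all subarrays
--     # ending at the current position (Kadane-style extension), collect the
--     # qualifying sums in a set and return its size.
--     sums = set()
--     ending = []  # ending[k] = sum of t[k..j] for the current end index j
--     for x in t:
--         ending = [s + x for s in ending]
--         ending.append(x)
--         for k, s in enumerate(ending):
--             if 1 <= s <= len(ending) - k:
--                 sums.add(s)
--     return len(sums)
-- ===== Notes on version B (the rewrite author's own statement) =====
-- stated objective: alternative
-- what changed: Replaced A's prefix-sum table plus nested start-index loops (with a guarded counter) by a single Kadane-style scan over end positions that extends the list of running sums of all subarrays ending at the current index, collects qualifying sums into a set unconditionally, and returns the set's size.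
import Mathlib
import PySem

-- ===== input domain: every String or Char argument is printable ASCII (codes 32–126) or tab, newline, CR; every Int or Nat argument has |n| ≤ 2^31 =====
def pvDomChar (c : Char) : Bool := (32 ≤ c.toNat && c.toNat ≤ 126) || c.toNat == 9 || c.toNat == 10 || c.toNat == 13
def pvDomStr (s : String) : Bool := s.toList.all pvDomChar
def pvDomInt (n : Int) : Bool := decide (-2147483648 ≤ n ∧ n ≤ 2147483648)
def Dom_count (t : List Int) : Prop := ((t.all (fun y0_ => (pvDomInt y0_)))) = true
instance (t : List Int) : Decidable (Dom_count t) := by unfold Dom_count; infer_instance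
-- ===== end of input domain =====

-- B replaces A's prefix-sum table + start-index nested loops + guarded counter by a
-- Kadane-style scan over end positions extending the running sums of subarrays ending there,
-- collecting qualifying sums in a set and returning its size (alternative decomposition).

-- ===== PORT A =====
-- prefix_sum[i + 1] = prefix_sum[i] + t[i]  (indices are always in range here, so pyGetD's default is never used)
def count_prefixStep (t : List Int) (ps : List Int) (i : Int) : List Int :=
  ps.set (i + 1).toNat (PySem.List.pyGetD ps i 0 + PySem.List.pyGetD t i 0)

-- curr_sum = prefix_sum[j + 1] - prefix_sum[i]
def count_csA (pfx : List Int) (i j : Int) : Int :=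
  PySem.List.pyGetD pfx (j + 1) 0 - PySem.List.pyGetD pfx i 0

-- body of A's inner loop over j: state = (count, sum_set)
def count_innerA (pfx : List Int) (i : Int) (st : Int × PySem.Set Int) (j : Int) : Int × PySem.Set Int :=
  if count_csA pfx i j ≤ j - i + 1 ∧ 1 ≤ count_csA pfx i j ∧ count_csA pfx i j ∉ st.2
  then (st.1 + 1, st.2.add (count_csA pfx i j)) else st

def count (t : List Int) : Int :=
  let n : Int := (t.length : Int)
  let pfx := (PySem.List.pyRange 0 n 1).foldl (count_prefixStep t) (List.replicate (n.toNat + 1) 0)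
  let res := (PySem.List.pyRange 0 n 1).foldl
    (fun st i => (PySem.List.pyRange i n 1).foldl (count_innerA pfx i) st)
    ((0 : Int), (PySem.Set.empty : PySem.Set Int))
  res.1

-- ===== PORT B =====
-- one step of B's scan: extend every running sum by x, append x, then run the enumerate loop
def count_altStep (st : List Int × PySem.Set Int) (x : Int) : List Int × PySem.Set Int :=
  let ending := st.1.map (fun s => s + x) ++ [x]
  (ending,
   (PySem.List.enumerate ending 0).foldl
     (fun S p => if 1 ≤ p.2 ∧ p.2 ≤ (ending.length : Int) - p.1 then PySem.Set.add S p.2 else S)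
     st.2)

def count_alt (t : List Int) : Int :=
  (((t.foldl count_altStep ([], (PySem.Set.empty : PySem.Set Int))).2.length : Int))

-- ===== PRECONDITION & SPEC =====
def Spec_count (t : List Int) (out : Int) : Prop := out = count_alt t
instance (t : List Int) (out : Int) : Decidable (Spec_count t out) := by unfold Spec_count; infer_instance

-- ===== CLAIM (what is proved, stated in full; the proofs are below) =====
def Claim_equal_count : Prop := ∀ (t : List Int), Dom_count t → Spec_count t (count t)

-- ===== LEMMAS AND PROOFS =====

-- prefix sums of t
def preSum (t : List Int) (k : Nat) : Int := (t.take k).sum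

-- the common characterisation: s is a qualifying distinct subarray sum of t
def QSum (t : List Int) (s : Int) : Prop :=
  ∃ k j : Nat, k ≤ j ∧ j < t.length ∧
    s = preSum t (j + 1) - preSum t k ∧ 1 ≤ s ∧ s ≤ (j : Int) - (k : Int) + 1

lemma preSum_succ (t : List Int) (k : Nat) (hk : k < t.length) :
    preSum t (k + 1) = preSum t k + t[k] := by
  simpa [preSum] using List.sum_take_succ t k hk

lemma preSum_append (u : List Int) (x : Int) (k : Nat) (hk : k ≤ u.length) :
    preSum (u ++ [x]) k = preSum u k := by
  simp [preSum, List.take_append_of_le_length hk]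

-- ---- generic facts about the conditional-add loop shape both programs use ----
lemma mem_foldl_ifAdd {α : Type} (C : α → Prop) [DecidablePred C] (f : α → Int) :
    ∀ (L : List α) (S : PySem.Set Int) (s : Int),
      s ∈ L.foldl (fun S x => if C x then PySem.Set.add S (f x) else S) S ↔
        s ∈ S ∨ ∃ x ∈ L, C x ∧ f x = s := by
  intro L
  induction L with
  | nil => intro S s; simp
  | cons a L ih =>
    intro S s
    rw [List.foldl_cons, ih]
    by_cases h : C a
    · simp only [if_pos h, PySem.Set.mem_add, List.mem_cons]
      constructor
      · rintro ((hs | rfl) | ⟨x, hx, hCx, hfx⟩)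
        · exact Or.inl hs
        · exact Or.inr ⟨a, Or.inl rfl, h, rfl⟩
        · exact Or.inr ⟨x, Or.inr hx, hCx, hfx⟩
      · rintro (hs | ⟨x, (rfl | hx), hCx, hfx⟩)
        · exact Or.inl (Or.inl hs)
        · exact Or.inl (Or.inr hfx.symm)
        · exact Or.inr ⟨x, hx, hCx, hfx⟩
    · simp only [if_neg h, List.mem_cons]
      constructor
      · rintro (hs | ⟨x, hx, hCx, hfx⟩)
        · exact Or.inl hs
        · exact Or.inr ⟨x, Or.inr hx, hCx, hfx⟩
      · rintro (hs | ⟨x, (rfl | hx), hCx, hfx⟩)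
        · exact Or.inl hs
        · exact absurd hCx h
        · exact Or.inr ⟨x, hx, hCx, hfx⟩

lemma nodup_foldl_ifAdd {α : Type} (C : α → Prop) [DecidablePred C] (f : α → Int) :
    ∀ (L : List α) (S : PySem.Set Int), S.Nodup →
      (L.foldl (fun S x => if C x then PySem.Set.add S (f x) else S) S).Nodup := by
  intro L
  induction L with
  | nil => intro S hS; simpa using hS
  | cons a L ih =>
    intro S hS
    rw [List.foldl_cons]
    apply ih
    split_ifs
    · exact PySem.Set.nodup_add _ _ hS
    · exact hS

-- ===== A-side =====

-- A's prefix table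
def pfxList (t : List Int) : List Int :=
  (PySem.List.pyRange 0 (t.length : Int) 1).foldl (count_prefixStep t)
    (List.replicate (t.length + 1) 0)

lemma pfx_partial (t : List Int) (m : Nat) (hm : m ≤ t.length) :
    (PySem.List.pyRange 0 (m : Int) 1).foldl (count_prefixStep t)
      (List.replicate (t.length + 1) 0)
    = (List.range (m + 1)).map (preSum t) ++ List.replicate (t.length - m) 0 := by
  induction m with
  | zero =>
    simp [preSum]
    cases t <;> simp [List.replicate_succ]
  | succ m ih =>
    have hm' : m ≤ t.length := Nat.le_of_succ_le hm
    have hr : PySem.List.pyRange 0 ((m + 1 : Nat) : Int) 1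
        = PySem.List.pyRange 0 (m : Int) 1 ++ [(m : Int)] := by
      have h1 : ((m + 1 : Nat) : Int) = (m : Int) + 1 := by push_cast; ring
      rw [h1]
      exact PySem.List.pyRange_one_succ_right (by positivity)
    rw [hr, List.foldl_append, ih hm']
    simp only [List.foldl_cons, List.foldl_nil]
    have hlen : ((List.range (m + 1)).map (preSum t)).length = m + 1 := by simp
    have hmlt : m < t.length := hm
    have hrep : List.replicate (t.length - m) (0 : Int)
        = 0 :: List.replicate (t.length - (m + 1)) 0 := by
      have : t.length - m = (t.length - (m + 1)) + 1 := by omega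
      rw [this, List.replicate_succ]
    unfold count_prefixStep
    have hget1 : PySem.List.pyGetD ((List.range (m + 1)).map (preSum t)
        ++ List.replicate (t.length - m) 0) (m : Int) 0 = preSum t m := by
      rw [PySem.List.pyGetD_eq_getElem _ _ (by positivity)
        (by simp; try omega)]
      rw [List.getElem_append_left (by simp [Int.toNat_natCast]; try omega)]
      simp [Int.toNat_natCast]
    have hget2 : PySem.List.pyGetD t (m : Int) 0 = t[m] := by
      rw [PySem.List.pyGetD_eq_getElem _ _ (by positivity) (by exact_mod_cast hmlt)]
      simp [Int.toNat_natCast]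
    rw [hget1, hget2, hrep]
    have hidx : ((m : Int) + 1).toNat = m + 1 := by omega
    rw [hidx]
    have hset : (((List.range (m + 1)).map (preSum t)
          ++ 0 :: List.replicate (t.length - (m + 1)) 0).set (m + 1)
          (preSum t m + t[m]))
        = ((List.range (m + 1)).map (preSum t)) ++ (preSum t m + t[m])
          :: List.replicate (t.length - (m + 1)) 0 := by
      rw [List.set_append_right _ _ (by simp), hlen]
      simp
    rw [hset]
    have hps : preSum t (m + 1) = preSum t m + t[m] := preSum_succ t m hmlt
    conv_rhs => rw [List.range_succ]
    simp [hps]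

lemma pfx_get (t : List Int) (k : Nat) (hk : k ≤ t.length) :
    PySem.List.pyGetD (pfxList t) (k : Int) 0 = preSum t k := by
  have h := pfx_partial t t.length le_rfl
  unfold pfxList
  rw [h]
  simp only [Nat.sub_self, List.replicate_zero, List.append_nil]
  rw [PySem.List.pyGetD_eq_getElem _ _ (by positivity) (by simp; omega)]
  simp [Int.toNat_natCast]

-- set-only version of A's inner step
def count_stepSetA (pfx : List Int) (i : Int) (S : PySem.Set Int) (j : Int) : PySem.Set Int :=
  if count_csA pfx i j ≤ j - i + 1 ∧ 1 ≤ count_csA pfx i j then PySem.Set.add S (count_csA pfx i j) else S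

-- A's (count, set) pair evolves as (set length, set), set as via count_stepSetA
lemma innerA_pair (pfx : List Int) (i : Int) :
    ∀ (L : List Int) (S : PySem.Set Int), S.Nodup →
      L.foldl (count_innerA pfx i) ((S.length : Int), S)
        = (((L.foldl (count_stepSetA pfx i) S).length : Int), L.foldl (count_stepSetA pfx i) S) := by
  intro L
  induction L with
  | nil => intro S _; simp
  | cons j L ih =>
    intro S hS
    rw [List.foldl_cons, List.foldl_cons]
    by_cases hc : count_csA pfx i j ≤ j - i + 1 ∧ 1 ≤ count_csA pfx i j
    · by_cases hm : count_csA pfx i j ∈ S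
      · have hA : count_innerA pfx i ((S.length : Int), S) j = ((S.length : Int), S) := by
          unfold count_innerA
          rw [if_neg]; rintro ⟨-, -, h⟩; exact h hm
        have hB : count_stepSetA pfx i S j = S := by
          unfold count_stepSetA
          rw [if_pos hc, PySem.Set.add_of_mem hm]
        rw [hA, hB]; exact ih S hS
      · have hA : count_innerA pfx i ((S.length : Int), S) j
            = (((S ++ [count_csA pfx i j]).length : Int), S ++ [count_csA pfx i j]) := by
          unfold count_innerA
          rw [if_pos ⟨hc.1, hc.2, hm⟩, PySem.Set.add_of_not_mem hm]
          simp
        have hB : count_stepSetA pfx i S j = S ++ [count_csA pfx i j] := by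
          unfold count_stepSetA
          rw [if_pos hc, PySem.Set.add_of_not_mem hm]
        rw [hA, hB]
        refine ih _ ?_
        rw [List.nodup_append]
        refine ⟨hS, List.nodup_singleton _, ?_⟩
        intro a ha b hb
        rw [List.mem_singleton] at hb
        subst hb
        exact fun h => hm (h ▸ ha)
    · have hA : count_innerA pfx i ((S.length : Int), S) j = ((S.length : Int), S) := by
        unfold count_innerA
        rw [if_neg]; rintro ⟨h1, h2, -⟩; exact hc ⟨h1, h2⟩
      have hB : count_stepSetA pfx i S j = S := by unfold count_stepSetA; rw [if_neg hc]
      rw [hA, hB]; exact ih S hS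

lemma stepSetA_eq_ifAdd (pfx : List Int) (i : Int) :
    count_stepSetA pfx i
      = fun S j => if count_csA pfx i j ≤ j - i + 1 ∧ 1 ≤ count_csA pfx i j
                   then PySem.Set.add S (count_csA pfx i j) else S := rfl

lemma nodup_innerSetA (pfx : List Int) (i : Int) (L : List Int) (S : PySem.Set Int) (hS : S.Nodup) :
    (L.foldl (count_stepSetA pfx i) S).Nodup := by
  rw [stepSetA_eq_ifAdd]
  exact nodup_foldl_ifAdd _ _ L S hS

lemma mem_innerSetA (pfx : List Int) (i : Int) (L : List Int) (S : PySem.Set Int) (s : Int) :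
    s ∈ L.foldl (count_stepSetA pfx i) S ↔
      s ∈ S ∨ ∃ j ∈ L, (count_csA pfx i j ≤ j - i + 1 ∧ 1 ≤ count_csA pfx i j) ∧ count_csA pfx i j = s := by
  rw [stepSetA_eq_ifAdd]
  exact mem_foldl_ifAdd _ _ L S s

-- the whole outer loop on the set side
def count_setA (t : List Int) : PySem.Set Int :=
  (PySem.List.pyRange 0 (t.length : Int) 1).foldl
    (fun S i => (PySem.List.pyRange i (t.length : Int) 1).foldl (count_stepSetA (pfxList t) i) S)
    (PySem.Set.empty : PySem.Set Int)

lemma outerA_pair (t : List Int) :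
    ∀ (L : List Int) (S : PySem.Set Int), S.Nodup →
      L.foldl (fun st i => (PySem.List.pyRange i (t.length : Int) 1).foldl (count_innerA (pfxList t) i) st)
        ((S.length : Int), S)
      = (((L.foldl (fun S i => (PySem.List.pyRange i (t.length : Int) 1).foldl (count_stepSetA (pfxList t) i) S) S).length : Int),
          L.foldl (fun S i => (PySem.List.pyRange i (t.length : Int) 1).foldl (count_stepSetA (pfxList t) i) S) S) := by
  intro L
  induction L with
  | nil => intro S _; simp
  | cons i L ih =>
    intro S hS
    rw [List.foldl_cons, List.foldl_cons]
    rw [innerA_pair (pfxList t) i _ S hS]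
    exact ih _ (nodup_innerSetA _ _ _ _ hS)

lemma nodup_outerA (t : List Int) :
    ∀ (L : List Int) (S : PySem.Set Int), S.Nodup →
      (L.foldl (fun S i => (PySem.List.pyRange i (t.length : Int) 1).foldl (count_stepSetA (pfxList t) i) S) S).Nodup := by
  intro L
  induction L with
  | nil => intro S hS; simpa using hS
  | cons i L ih =>
    intro S hS
    rw [List.foldl_cons]
    exact ih _ (nodup_innerSetA _ _ _ _ hS)

lemma nodup_setA (t : List Int) : (count_setA t).Nodup :=
  nodup_outerA t _ PySem.Set.empty (by simp [PySem.Set.empty])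

lemma count_eq_setA (t : List Int) : count t = ((count_setA t).length : Int) := by
  unfold count count_setA
  have h := outerA_pair t (PySem.List.pyRange 0 (t.length : Int) 1) PySem.Set.empty (by simp [PySem.Set.empty])
  simp only [PySem.Set.empty, List.length_nil, Nat.cast_zero] at h
  have hpfx : (PySem.List.pyRange 0 (t.length : Int) 1).foldl (count_prefixStep t)
      (List.replicate ((t.length : Int).toNat + 1) 0) = pfxList t := by
    unfold pfxList
    simp [Int.toNat_natCast]
  simp only [hpfx, PySem.Set.empty] at *
  rw [h]

-- membership of the outer fold
lemma mem_setA_aux (t : List Int) :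
    ∀ (L : List Int) (S : PySem.Set Int) (s : Int),
      s ∈ L.foldl (fun S i => (PySem.List.pyRange i (t.length : Int) 1).foldl (count_stepSetA (pfxList t) i) S) S ↔
        s ∈ S ∨ ∃ i ∈ L, ∃ j ∈ PySem.List.pyRange i (t.length : Int) 1,
          (count_csA (pfxList t) i j ≤ j - i + 1 ∧ 1 ≤ count_csA (pfxList t) i j) ∧ count_csA (pfxList t) i j = s := by
  intro L
  induction L with
  | nil => intro S s; simp
  | cons i L ih =>
    intro S s
    rw [List.foldl_cons, ih, mem_innerSetA]
    simp only [List.mem_cons]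
    constructor
    · rintro ((hs | ⟨j, hj, hc, he⟩) | ⟨i', hi', rest⟩)
      · exact Or.inl hs
      · exact Or.inr ⟨i, Or.inl rfl, j, hj, hc, he⟩
      · exact Or.inr ⟨i', Or.inr hi', rest⟩
    · rintro (hs | ⟨i', (rfl | hi'), rest⟩)
      · exact Or.inl (Or.inl hs)
      · exact Or.inl (Or.inr rest)
      · exact Or.inr ⟨i', hi', rest⟩

lemma mem_setA (t : List Int) (s : Int) : s ∈ count_setA t ↔ QSum t s := by
  unfold count_setA
  rw [mem_setA_aux]
  simp only [PySem.Set.empty, List.not_mem_nil, false_or]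
  constructor
  · rintro ⟨i, hi, j, hj, ⟨hc1, hc2⟩, rfl⟩
    rw [PySem.List.mem_pyRange_one] at hi hj
    obtain ⟨hi0, hin⟩ := hi
    obtain ⟨hji, hjn⟩ := hj
    have he : count_csA (pfxList t) i j = preSum t (j.toNat + 1) - preSum t i.toNat := by
      unfold count_csA
      have h1 : (j + 1) = ((j.toNat + 1 : Nat) : Int) := by omega
      have h2 : i = ((i.toNat : Nat) : Int) := by omega
      rw [h1, h2, pfx_get t (j.toNat + 1) (by omega), pfx_get t i.toNat (by omega)]
      have h3 : ((i.toNat : Int)).toNat = i.toNat := by omega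
      rw [h3]
    refine ⟨i.toNat, j.toNat, by omega, by omega, he, hc2, ?_⟩
    have hj' : ((j.toNat : Nat) : Int) = j := by omega
    have hi' : ((i.toNat : Nat) : Int) = i := by omega
    rw [hj', hi']
    exact hc1
  · rintro ⟨k, j, hkj, hjn, rfl, h1, h2⟩
    refine ⟨(k : Int), ?_, (j : Int), ?_, ⟨?_, ?_⟩, ?_⟩
    · rw [PySem.List.mem_pyRange_one]; omega
    · rw [PySem.List.mem_pyRange_one]; omega
    · unfold count_csA
      have hc : ((j : Int) + 1) = ((j + 1 : Nat) : Int) := by push_cast; ring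
      rw [hc, pfx_get t (j + 1) (by omega), pfx_get t k (by omega)]
      omega
    · unfold count_csA
      have hc : ((j : Int) + 1) = ((j + 1 : Nat) : Int) := by push_cast; ring
      rw [hc, pfx_get t (j + 1) (by omega), pfx_get t k (by omega)]
      omega
    · unfold count_csA
      have hc : ((j : Int) + 1) = ((j + 1 : Nat) : Int) := by push_cast; ring
      rw [hc, pfx_get t (j + 1) (by omega), pfx_get t k (by omega)]

-- ===== B-side =====

-- the running sums of all subarrays ending at the last position of u
def count_endOf (u : List Int) : List Int :=
  (List.range u.length).map (fun k => (u.drop k).sum)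

lemma mem_enumerate {α : Type} :
    ∀ (xs : List α) (st : Int) (p : Int × α),
      p ∈ PySem.List.enumerate xs st ↔ ∃ k : Nat, ∃ h : k < xs.length, p = (st + (k : Int), xs[k]) := by
  intro xs
  induction xs with
  | nil => intro st p; simp [PySem.List.enumerate]
  | cons a xs ih =>
    intro st p
    rw [PySem.List.enumerate_cons, List.mem_cons, ih]
    constructor
    · rintro (rfl | ⟨k, hk, rfl⟩)
      · exact ⟨0, by simp, by simp⟩
      · refine ⟨k + 1, by simpa using hk, ?_⟩
        simp only [List.getElem_cons_succ]
        congr 1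
        push_cast
        ring
    · rintro ⟨k, hk, rfl⟩
      cases k with
      | zero => left; simp
      | succ k =>
        right
        refine ⟨k, by simpa using hk, ?_⟩
        simp only [List.getElem_cons_succ]
        congr 1
        push_cast
        ring

lemma count_altStep_eq (e : List Int) (S : PySem.Set Int) (x : Int) :
    count_altStep (e, S) x =
      (e.map (fun s => s + x) ++ [x],
       (PySem.List.enumerate (e.map (fun s => s + x) ++ [x]) 0).foldl
         (fun S p => if 1 ≤ p.2 ∧ p.2 ≤ ((e.map (fun s => s + x) ++ [x]).length : Int) - p.1
                     then PySem.Set.add S p.2 else S) S) := rfl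

lemma endOf_append (u : List Int) (x : Int) :
    (count_endOf u).map (fun s => s + x) ++ [x] = count_endOf (u ++ [x]) := by
  unfold count_endOf
  rw [List.map_map]
  simp only [List.length_append, List.length_singleton]
  rw [List.range_succ, List.map_append]
  congr 1
  · apply List.map_congr_left
    intro k hk
    rw [List.mem_range] at hk
    simp only [Function.comp_apply]
    rw [List.drop_append_of_le_length (le_of_lt hk), List.sum_append]
    simp
  · simp

lemma drop_sum_eq (u : List Int) (k : Nat) :
    (u.drop k).sum = u.sum - (u.take k).sum := by
  have := List.sum_take_add_sum_drop u k
  omega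

-- B's state after scanning u: first component = count_endOf u, second = the qualifying sums of u
lemma B_invariant (u : List Int) :
    (u.foldl count_altStep ([], (PySem.Set.empty : PySem.Set Int))).1 = count_endOf u ∧
    (u.foldl count_altStep ([], (PySem.Set.empty : PySem.Set Int))).2.Nodup ∧
    ∀ s : Int, s ∈ (u.foldl count_altStep ([], (PySem.Set.empty : PySem.Set Int))).2 ↔ QSum u s := by
  induction u using List.reverseRecOn with
  | nil =>
    refine ⟨rfl, by simp [PySem.Set.empty], ?_⟩
    intro s
    simp [PySem.Set.empty, QSum]
  | append_singleton u x ih =>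
    obtain ⟨h1, hnd, h2⟩ := ih
    rw [List.foldl_append, List.foldl_cons, List.foldl_nil]
    have hst : u.foldl count_altStep ([], (PySem.Set.empty : PySem.Set Int))
        = (count_endOf u, (u.foldl count_altStep ([], (PySem.Set.empty : PySem.Set Int))).2) := by
      rw [← h1]
    rw [hst, count_altStep_eq, endOf_append]
    set Su := (u.foldl count_altStep ([], (PySem.Set.empty : PySem.Set Int))).2 with hSu
    set n := u.length with hn
    have hlen : (count_endOf (u ++ [x])).length = n + 1 := by
      unfold count_endOf; simp; omega
    have hget : ∀ (k : Nat) (h : k < n + 1),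
        (count_endOf (u ++ [x]))[k]'(by rw [hlen]; exact h) = ((u ++ [x]).drop k).sum := by
      intro k h
      unfold count_endOf
      simp
    refine ⟨rfl, ?_, ?_⟩
    · exact nodup_foldl_ifAdd
        (fun p : Int × Int => 1 ≤ p.2 ∧ p.2 ≤ ((count_endOf (u ++ [x])).length : Int) - p.1)
        (fun p => p.2) _ Su hnd
    · intro s
      rw [mem_foldl_ifAdd
        (fun p : Int × Int => 1 ≤ p.2 ∧ p.2 ≤ ((count_endOf (u ++ [x])).length : Int) - p.1)
        (fun p => p.2)]
      rw [h2]
      constructor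
      · rintro (hold | ⟨p, hp, hC, rfl⟩)
        · -- an old qualifying sum of u is one of u ++ [x]
          obtain ⟨k, j, hkj, hjn, rfl, hs1, hs2⟩ := hold
          refine ⟨k, j, hkj, by simp; omega, ?_, hs1, hs2⟩
          rw [preSum_append u x (j + 1) (by omega), preSum_append u x k (by omega)]
        · -- a sum ending at the new last position
          rw [mem_enumerate] at hp
          obtain ⟨k, hk, rfl⟩ := hp
          rw [hlen] at hk
          simp only [zero_add] at hC ⊢
          rw [hget k hk] at hC ⊢
          refine ⟨k, n, by omega, by simp; omega, ?_, ?_, ?_⟩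
          · rw [drop_sum_eq]
            have hts : preSum (u ++ [x]) (n + 1) = (u ++ [x]).sum := by
              unfold preSum
              rw [List.take_of_length_le (by simp [hn])]
            have htk : preSum (u ++ [x]) k = ((u ++ [x]).take k).sum := rfl
            rw [hts, htk]
          · exact hC.1
          · have h3 := hC.2
            rw [hlen] at h3
            push_cast at h3
            omega
      · rintro ⟨k, j, hkj, hjn, rfl, hs1, hs2⟩
        simp only [List.length_append, List.length_singleton] at hjn
        by_cases hje : j < n
        · -- inside u
          left
          refine ⟨k, j, hkj, by omega, ?_, hs1, hs2⟩
          rw [preSum_append u x (j + 1) (by omega), preSum_append u x k (by omega)]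
        · -- j = n : a sum ending at the new position
          have hj : j = n := by omega
          subst hj
          have hts : preSum (u ++ [x]) (n + 1) = (u ++ [x]).sum := by
            unfold preSum
            rw [List.take_of_length_le (by simp [hn])]
          have hds : ((u ++ [x]).drop k).sum = preSum (u ++ [x]) (n + 1) - preSum (u ++ [x]) k := by
            rw [drop_sum_eq, hts]; rfl
          right
          refine ⟨((k : Int), ((u ++ [x]).drop k).sum), ?_, ?_, ?_⟩
          · rw [mem_enumerate]
            refine ⟨k, by rw [hlen]; omega, ?_⟩
            rw [hget k (by omega)]
            simp
          · refine ⟨?_, ?_⟩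
            · show (1 : Int) ≤ ((u ++ [x]).drop k).sum
              rw [hds]; exact hs1
            · show ((u ++ [x]).drop k).sum ≤ ((count_endOf (u ++ [x])).length : Int) - (k : Int)
              rw [hds, hlen]
              push_cast
              omega
          · exact hds

-- ===== putting the two sides together =====

lemma count_alt_eq_setB (t : List Int) :
    count_alt t = (((t.foldl count_altStep ([], (PySem.Set.empty : PySem.Set Int))).2.length : Int)) := rfl

-- ===== VERDICT (by name: the statement is the Claim_ definition above) =====
theorem count_spec : Claim_equal_count := by
  intro t _
  unfold Spec_count
  rw [count_eq_setA, count_alt_eq_setB]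
  obtain ⟨-, hnd, hmem⟩ := B_invariant t
  have hperm : (count_setA t).Perm (t.foldl count_altStep ([], (PySem.Set.empty : PySem.Set Int))).2 := by
    rw [List.perm_ext_iff_of_nodup (nodup_setA t) hnd]
    intro s
    rw [mem_setA, hmem]
  rw [hperm.length_eq]
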